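-- pv_equiv track=rewrite | github.com/ham20000/AdvancedMindBlocks_hmirza21 | AMBTokenizer.py | isTokenNumber
-- ===== SOURCE A (Python) =====
-- def isTokenNumber(token):
--     detectNonNum = False  ## turns to true if a non number is detected
--     for index, char in enumerate(token):
--         # check if this char is not a digit
--         if (not char.isdigit()):
--             # if char is not a digit, we need take into account that it might be a '-', denoting a negative number
--             if (char == '-'):
--                 if(index > 0):
--                     detectNonNum = True
--             else:
--                 detectNonNum = True
--     return not detectNonNum
-- ===== SOURCE B (Python) =====
-- def isTokenNumber(token):
--     body = token[1:] if token[:1] == '-' else token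
--     return body == '' or body.isdigit()
-- ===== Notes on version B (the rewrite author's own statement) =====
-- stated objective: simpler
-- what changed: Handles the optional leading sign once by slicing it off, then delegates the whole digit test to str.isdigit() (with an explicit empty-body clause), replacing A's per-character Python loop that tracks the index and a flag.
import Mathlib
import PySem

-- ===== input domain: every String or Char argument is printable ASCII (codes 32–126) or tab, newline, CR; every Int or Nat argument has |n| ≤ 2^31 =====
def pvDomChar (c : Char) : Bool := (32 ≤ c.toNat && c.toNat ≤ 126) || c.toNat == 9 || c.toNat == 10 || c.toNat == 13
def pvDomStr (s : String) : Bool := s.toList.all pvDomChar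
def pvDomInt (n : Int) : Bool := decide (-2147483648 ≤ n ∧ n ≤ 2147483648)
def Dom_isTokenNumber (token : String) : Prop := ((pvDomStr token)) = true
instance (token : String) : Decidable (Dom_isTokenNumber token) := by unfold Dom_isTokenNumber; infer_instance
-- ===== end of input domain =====

-- B splits off an optional leading '-' once and delegates the digit test to str.isdigit()
-- (with an explicit empty-body clause), replacing A's per-character loop with an index check and a flag.

-- ===== PORT A =====
def isTokenNumber (token : String) : Bool :=
  let detectNonNum :=
    (PySem.List.enumerate token.toList).foldl
      (fun detectNonNum p =>
        if !(PySem.Chars.isdigit p.2) then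
          if p.2 == '-' then
            if p.1 > 0 then true else detectNonNum
          else true
        else detectNonNum)
      false
  !detectNonNum

-- ===== PORT B =====
def isTokenNumber_alt (token : String) : Bool :=
  let body := if PySem.Str.slice token none (some 1) == "-" then PySem.Str.slice token (some 1) none else token
  body == "" || PySem.Str.strIsdigit body

-- ===== PRECONDITION & SPEC =====
def Spec_isTokenNumber (token : String) (out : Bool) : Prop := out = isTokenNumber_alt token
instance (token : String) (out : Bool) : Decidable (Spec_isTokenNumber token out) := by unfold Spec_isTokenNumber; infer_instance

-- ===== CLAIM (what is proved, stated in full; the proofs are below) =====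
def Claim_equal_isTokenNumber : Prop := ∀ (token : String), Dom_isTokenNumber token → Spec_isTokenNumber token (isTokenNumber token)

-- ===== LEMMAS AND PROOFS =====

theorem beq_ofList (l m : List Char) :
    (String.ofList l == String.ofList m) = (l == m) := by
  rcases h : l == m
  · simp_all [beq_eq_false_iff_ne, String.ofList_inj]
  · simp_all [beq_iff_eq]

theorem ofList_cons_beq_empty (c : Char) (cs : List Char) :
    (String.ofList (c :: cs) == "") = false := by
  rw [show ("" : String) = String.ofList [] from rfl, beq_ofList]
  simp

-- A's loop from any positive start index just detects a non-digit character.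
theorem loopA_pos (cs : List Char) (s : Int) (hs : 0 < s) (d : Bool) :
    (PySem.List.enumerate cs s).foldl
      (fun detectNonNum p =>
        if !(PySem.Chars.isdigit p.2) then
          if p.2 == '-' then
            if p.1 > 0 then true else detectNonNum
          else true
        else detectNonNum)
      d = (d || cs.any (fun c => !PySem.Chars.isdigit c)) := by
  induction cs generalizing s d with
  | nil => simp [PySem.List.enumerate_nil]
  | cons c cs ih =>
      rw [PySem.List.enumerate_cons, List.foldl_cons, ih (s+1) (by omega)]
      by_cases hd : PySem.Chars.isdigit c
      · simp [hd]
      · simp [hd, hs]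

-- ===== VERDICT (by name: the statement is the Claim_ definition above) =====
theorem isTokenNumber_spec : Claim_equal_isTokenNumber := by
  intro token _
  unfold Spec_isTokenNumber isTokenNumber isTokenNumber_alt
  cases h : token.toList with
  | nil =>
      have : token = "" := by
        have := congrArg String.ofList h
        simpa using this
      subst this
      decide
  | cons c cs =>
      have htok : token = String.ofList (c :: cs) := by
        have := congrArg String.ofList h
        simpa using this
      subst htok
      simp only [PySem.Str.slice, PySem.Str.strIsdigit, String.toList_ofList,
        PySem.Chars.slice, PySem.List.slice_to (b := 1) _ (by omega),
        PySem.List.slice_from (a := 1) _ (by omega),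
        PySem.List.enumerate_cons, List.foldl_cons]
      rw [loopA_pos cs (0+1) (by omega)]
      simp only [Int.toNat_one, List.take_succ_cons, List.take_zero,
        List.drop_succ_cons, List.drop_zero,
        show ("" : String) = String.ofList [] from rfl,
        show ("-" : String) = String.ofList ['-'] from rfl,
        beq_ofList]
      by_cases hc : c = '-'
      · subst hc
        cases cs <;>
          simp [PySem.Chars.strIsdigit, ofList_cons_beq_empty, List.all_eq_not_any_not]
      · by_cases hd : PySem.Chars.isdigit c <;>
          simp [hc, hd, PySem.Chars.strIsdigit, ofList_cons_beq_empty, List.all_eq_not_any_not]
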